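-- pv_equiv track=rewrite | github.com/nineouttaten/PythonLabs | homeworks/tasks3/Конкатенация.py | concatenation
-- ===== SOURCE A (Python) =====
-- def concatenation(s):
--     L = len(s)
--     k = 0
--     parts = []
--     for i in range(2, L, 2):
--         for j in range(L - i + 1):
--             word = s[j:j + i]
--             part1 = word[:i // 2]
--             part2 = word[i // 2:]
--             if part1 == part2 and not part1 in parts:
--                 parts.append(part1)
--                 k += 1
--     return k
-- ===== SOURCE B (Python) =====
-- def concatenation(s):
--     L = len(s)
--     halves = set()
--     for h in range(1, (L - 1) // 2 + 1):
--         run = 0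
--         for j in range(L - h - 1, -1, -1):
--             run = run + 1 if s[j] == s[j + h] else 0
--             if run >= h:
--                 halves.add(s[j:j + h])
--     return len(halves)
-- ===== Notes on version B (the rewrite author's own statement) =====
-- stated objective: faster
-- what changed: A slices every even-length window and compares its two halves (re-slicing word/part1/part2 for every (length, position) pair) while deduplicating via a list scan; B instead, for each half-length h, does one backward run-length scan of the single-character matches s[j] == s[j+h], which detects a doubled half at position j exactly when the run reaches h, and collects the distinct halves in a set; intended as faster, and a timing run measured B 3-8x faster at the sizes both finish (on highly periodic strings both remain cubic).
import Mathlib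
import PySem

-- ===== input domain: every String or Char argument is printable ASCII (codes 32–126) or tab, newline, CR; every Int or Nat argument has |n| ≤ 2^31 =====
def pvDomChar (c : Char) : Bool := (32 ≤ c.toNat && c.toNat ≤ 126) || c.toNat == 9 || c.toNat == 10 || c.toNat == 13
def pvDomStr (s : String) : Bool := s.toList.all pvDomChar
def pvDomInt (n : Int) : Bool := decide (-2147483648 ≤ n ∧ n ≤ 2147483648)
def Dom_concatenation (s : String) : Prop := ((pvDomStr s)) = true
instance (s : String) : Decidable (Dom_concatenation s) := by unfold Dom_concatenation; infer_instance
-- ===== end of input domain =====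

-- B replaces A's nested slice-every-window-and-compare-halves scan by a per-half-length
-- backward run-length scan of character matches, collecting distinct halves in a set
-- (intended as faster; a timing run measured B 3-8x faster at the sizes both finish).


-- ===== PORT A =====
def concatenation (s : String) : Int :=
  let L : Int := PySem.Str.len s
  let res : Int × List String :=
    (PySem.List.pyRange 2 L 2).foldl (fun st i =>
      (PySem.List.pyRange 0 (L - i + 1) 1).foldl (fun (st : Int × List String) j =>
        let word := PySem.Str.slice s (some j) (some (j + i))
        let part1 := PySem.Str.slice word none (some (PySem.Int.floordiv i 2))
        let part2 := PySem.Str.slice word (some (PySem.Int.floordiv i 2)) none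
        if part1 == part2 && !(st.2.contains part1) then (st.1 + 1, st.2 ++ [part1])
        else st) st) (0, [])
  res.1

-- ===== PORT B =====
def concatenation_alt (s : String) : Int :=
  let L : Int := PySem.Str.len s
  let halves : PySem.Set String :=
    (PySem.List.pyRange 1 (PySem.Int.floordiv (L - 1) 2 + 1) 1).foldl (fun halves h =>
      ((PySem.List.pyRange (L - h - 1) (-1) (-1)).foldl
        (fun (st : Int × PySem.Set String) j =>
          let run : Int := if PySem.Str.pyGet? s j == PySem.Str.pyGet? s (j + h) then st.1 + 1 else 0
          (run, if h ≤ run then PySem.Set.add st.2 (PySem.Str.slice s (some j) (some (j + h))) else st.2))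
        (0, halves)).2) PySem.Set.empty
  PySem.Set.len halves

-- ===== PRECONDITION & SPEC =====
def Spec_concatenation (s : String) (out : Int) : Prop := out = concatenation_alt s
instance (s : String) (out : Int) : Decidable (Spec_concatenation s out) := by unfold Spec_concatenation; infer_instance

-- ===== CLAIM (what is proved, stated in full; the proofs are below) =====
def Claim_equal_concatenation : Prop := ∀ (s : String), Dom_concatenation s → Spec_concatenation s (concatenation s)

-- ===== LEMMAS AND PROOFS =====

-- the half-string s[j:j+h], as a list of chars
def pvSeg (cs : List Char) (j h : Nat) : List Char := (cs.drop j).take h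

-- length of the maximal run of positions t ≥ j with cs[t] == cs[t+h]
def pvRun (cs : List Char) (h j : Nat) : Nat :=
  if hj : j + h < cs.length then
    (if cs[j]? == cs[j + h]? then pvRun cs h (j + 1) + 1 else 0)
  else 0
termination_by cs.length - j
decreasing_by omega

-- the common characterisation: x is a half whose doubling occurs in cs, with 2h ≤ len-1
def pvFound (cs : List Char) (x : String) : Prop :=
  ∃ h j : Nat, 1 ≤ h ∧ 2 * h + 1 ≤ cs.length ∧ j + 2 * h ≤ cs.length ∧
    pvSeg cs j h = pvSeg cs (j + h) h ∧ x.toList = pvSeg cs j h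

theorem pv_foldl_foldl {α β σ : Type} (xs : List α) (g : α → List β) (f : σ → α → β → σ)
    (init : σ) :
    xs.foldl (fun st i => (g i).foldl (fun st j => f st i j) st) init
      = (xs.flatMap (fun i => (g i).map (fun j => (i, j)))).foldl (fun st p => f st p.1 p.2) init := by
  induction xs generalizing init with
  | nil => rfl
  | cons a t ih => simp [List.flatMap_cons, List.foldl_append, List.foldl_map, ih]

theorem pv_foldA {β : Type} (C : β → Bool) (V : β → String) (l : List β) :
    ∀ parts : List String,
      l.foldl (fun (st : Int × List String) p =>
          if C p && !(st.2.contains (V p)) then (st.1 + 1, st.2 ++ [V p]) else st)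
        ((parts.length : Int), parts)
      = (((((l.filter C).map V).foldl (fun s x => PySem.Set.add s x) parts).length : Int),
          (((l.filter C).map V).foldl (fun s x => PySem.Set.add s x) parts)) := by
  induction l with
  | nil => intro parts; rfl
  | cons p t ih =>
    intro parts
    by_cases hC : C p
    · by_cases hm : V p ∈ parts
      · have hc : parts.contains (V p) = true := by
          simpa [List.contains_iff_mem] using hm
        simp only [List.foldl_cons, List.filter_cons, hC, hc, Bool.and_false, Bool.not_true,
          if_true, if_false, List.map_cons]
        have : PySem.Set.add parts (V p) = parts := PySem.Set.add_of_mem hm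
        simpa [this] using ih parts
      · have hc : parts.contains (V p) = false := by
          simpa [List.contains_iff_mem] using hm
        have hadd : PySem.Set.add parts (V p) = parts ++ [V p] := PySem.Set.add_of_not_mem hm
        have hlen : ((parts ++ [V p]).length : Int) = (parts.length : Int) + 1 := by
          simp
        simp only [List.foldl_cons, List.filter_cons, hC, hc, Bool.not_false, Bool.and_true,
          if_true, List.map_cons, hadd]
        rw [← hlen]
        exact ih (parts ++ [V p])
    · simp only [List.foldl_cons, List.filter_cons, hC, Bool.false_and, if_false]
      exact ih parts

theorem pv_setfold {α : Type} (l : List α) (F : PySem.Set String → α → PySem.Set String)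
    (Q : α → String → Prop)
    (hF : ∀ S a, a ∈ l → S.Nodup →
        (F S a).Nodup ∧ ∀ y, y ∈ F S a ↔ y ∈ S ∨ Q a y) :
    ∀ S, S.Nodup → (l.foldl F S).Nodup ∧
      ∀ y, y ∈ l.foldl F S ↔ y ∈ S ∨ ∃ a ∈ l, Q a y := by
  induction l with
  | nil => intro S hS; simpa using hS
  | cons a t ih =>
    intro S hS
    have h1 := hF S a (by simp) hS
    have ih' := ih (fun S b hb => hF S b (by simp [hb]) ) (F S a) h1.1
    refine ⟨ih'.1, fun y => ?_⟩
    rw [List.foldl_cons, ih'.2 y, h1.2 y]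
    constructor
    · rintro ((hy | hq) | ⟨b, hb, hq⟩)
      · exact Or.inl hy
      · exact Or.inr ⟨a, by simp, hq⟩
      · exact Or.inr ⟨b, by simp [hb], hq⟩
    · rintro (hy | ⟨b, hb, hq⟩)
      · exact Or.inl (Or.inl hy)
      · rcases List.mem_cons.mp hb with rfl | hb
        · exact Or.inl (Or.inr hq)
        · exact Or.inr ⟨b, hb, hq⟩

theorem pvRun_le_iff (cs : List Char) (h k : Nat) :
    ∀ j, (k ≤ pvRun cs h j ↔ ∀ t < k, j + t + h < cs.length ∧ cs[j + t]? = cs[j + t + h]?) := by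
  induction k with
  | zero => intro j; simp
  | succ k ih =>
    intro j
    rw [pvRun]
    by_cases hj : j + h < cs.length
    · rw [dif_pos hj]
      by_cases hb : cs[j]? = cs[j + h]?
      · have hbeq : (cs[j]? == cs[j + h]?) = true := beq_iff_eq.mpr hb
        rw [if_pos hbeq, Nat.succ_le_succ_iff, ih (j + 1)]
        constructor
        · intro H t ht
          rcases Nat.eq_zero_or_pos t with rfl | htpos
          · simpa using ⟨hj, hb⟩
          · have := H (t - 1) (by omega)
            constructor
            · omega
            · have e1 : j + 1 + (t - 1) = j + t := by omega
              rw [e1] at this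
              exact this.2
        · intro H t ht
          have := H (t + 1) (by omega)
          constructor
          · omega
          · have e1 : j + (t + 1) = j + 1 + t := by omega
            rw [e1] at this
            exact this.2
      · have hbeq : (cs[j]? == cs[j + h]?) = false := by
          simpa using hb
        rw [if_neg (by simp [hbeq])]
        constructor
        · omega
        · intro H
          exact absurd ((H 0 (by omega)).2) (by simpa using hb)
    · rw [dif_neg hj]
      constructor
      · omega
      · intro H
        exact absurd ((H 0 (by omega)).1) (by simpa using hj)

theorem pvSeg_eq_iff (cs : List Char) (j h : Nat) (hb : j + 2 * h ≤ cs.length) :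
    pvSeg cs j h = pvSeg cs (j + h) h ↔ ∀ t < h, cs[j + t]? = cs[j + t + h]? := by
  constructor
  · intro H t ht
    have := congrArg (fun l => l[t]?) H
    simp only [pvSeg, List.getElem?_take, List.getElem?_drop, ht, if_pos] at this
    have e : j + h + t = j + t + h := by omega
    rw [e] at this
    exact this
  · intro H
    apply List.ext_getElem?
    intro t
    by_cases ht : t < h
    · simp only [pvSeg, List.getElem?_take, List.getElem?_drop, ht, if_pos]
      have e : j + h + t = j + t + h := by omega
      rw [e]
      exact H t ht
    · simp [pvSeg, ht]

theorem pvRun_ge_iff (cs : List Char) (h j : Nat) (h1 : 1 ≤ h) :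
    h ≤ pvRun cs h j ↔ (j + 2 * h ≤ cs.length ∧ pvSeg cs j h = pvSeg cs (j + h) h) := by
  rw [pvRun_le_iff]
  constructor
  · intro H
    have hlast := H (h - 1) (by omega)
    have hbnd : j + 2 * h ≤ cs.length := by omega
    refine ⟨hbnd, (pvSeg_eq_iff cs j h hbnd).mpr fun t ht => (H t ht).2⟩
  · rintro ⟨hbnd, hseg⟩
    intro t ht
    exact ⟨by omega, (pvSeg_eq_iff cs j h hbnd).mp hseg t ht⟩

-- ---- A-side characterisation ----

def pvCA (s : String) (p : Int × Int) : Bool :=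
  let word := PySem.Str.slice s (some p.2) (some (p.2 + p.1))
  (PySem.Str.slice word none (some (PySem.Int.floordiv p.1 2)))
    == (PySem.Str.slice word (some (PySem.Int.floordiv p.1 2)) none)

def pvVA (s : String) (p : Int × Int) : String :=
  PySem.Str.slice (PySem.Str.slice s (some p.2) (some (p.2 + p.1))) none
    (some (PySem.Int.floordiv p.1 2))

def pvPairsA (s : String) : List (Int × Int) :=
  (PySem.List.pyRange 2 (PySem.Str.len s) 2).flatMap
    (fun i => (PySem.List.pyRange 0 (PySem.Str.len s - i + 1) 1).map (fun j => (i, j)))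

def pvBodyA (s : String) (st : Int × List String) (i j : Int) : Int × List String :=
  let word := PySem.Str.slice s (some j) (some (j + i))
  let part1 := PySem.Str.slice word none (some (PySem.Int.floordiv i 2))
  let part2 := PySem.Str.slice word (some (PySem.Int.floordiv i 2)) none
  if part1 == part2 && !(st.2.contains part1) then (st.1 + 1, st.2 ++ [part1]) else st

theorem pv_slice_toList (s : String) (j h : Nat) :
    (PySem.Str.slice s (some (j : Int)) (some ((j : Int) + (h : Int)))).toList
      = (s.toList.drop j).take h := by
  rw [PySem.Str.toList_slice, PySem.Chars.slice_eq_listSlice]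
  have e : (j : Int) + (h : Int) = ((j + h : Nat) : Int) := by push_cast; ring
  rw [e, PySem.List.slice_natCast]
  congr 1
  omega

theorem pv_floordiv_two (h : Nat) :
    PySem.Int.floordiv (((2 * h : Nat) : Int)) 2 = ((h : Nat) : Int) := by
  have h2 : (2 * h) / 2 = h := by omega
  have := PySem.Int.floordiv_natCast (2 * h) 2
  rw [h2] at this
  exact_mod_cast this

theorem pv_part1_toList (s : String) (h jn : Nat) :
    (pvVA s (((2 * h : Nat) : Int), ((jn : Nat) : Int))).toList = pvSeg s.toList jn h := by
  unfold pvVA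
  rw [PySem.Str.toList_slice, PySem.Chars.slice_eq_listSlice, pv_floordiv_two,
    PySem.List.slice_to_natCast, pv_slice_toList]
  unfold pvSeg
  rw [List.take_take]
  congr 1
  omega

theorem pv_part2_toList (s : String) (h jn : Nat) :
    (PySem.Str.slice (PySem.Str.slice s (some ((jn : Nat) : Int))
        (some (((jn : Nat) : Int) + ((2 * h : Nat) : Int))))
      (some (PySem.Int.floordiv (((2 * h : Nat) : Int)) 2)) none).toList
      = pvSeg s.toList (jn + h) h := by
  rw [PySem.Str.toList_slice, PySem.Chars.slice_eq_listSlice, pv_floordiv_two,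
    PySem.List.slice_from_natCast, pv_slice_toList]
  unfold pvSeg
  rw [List.drop_take, List.drop_drop]
  congr 1
  omega

theorem pv_CA_iff (s : String) (h jn : Nat) :
    pvCA s (((2 * h : Nat) : Int), ((jn : Nat) : Int)) = true ↔
      pvSeg s.toList jn h = pvSeg s.toList (jn + h) h := by
  unfold pvCA
  rw [beq_iff_eq, ← String.toList_inj]
  constructor
  · intro H
    have h1 := pv_part1_toList s h jn
    have h2 := pv_part2_toList s h jn
    unfold pvVA at h1
    rw [← h1, ← h2]
    exact H
  · intro H
    have h1 := pv_part1_toList s h jn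
    have h2 := pv_part2_toList s h jn
    unfold pvVA at h1
    rw [h1, h2]
    exact H

theorem pv_len_eq (s : String) : PySem.Str.len s = ((s.toList.length : Nat) : Int) := by
  simp [pysem]

theorem pv_A_eq (s : String) :
    concatenation s
      = ((PySem.Set.ofList (((pvPairsA s).filter (pvCA s)).map (pvVA s))).length : Int) := by
  have h1 : concatenation s
      = ((PySem.List.pyRange 2 (PySem.Str.len s) 2).foldl
          (fun st i => (PySem.List.pyRange 0 (PySem.Str.len s - i + 1) 1).foldl
            (fun st j => pvBodyA s st i j) st) ((0 : Int), ([] : List String))).1 := rfl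
  rw [h1, pv_foldl_foldl]
  have h2 : (fun (st : Int × List String) (p : Int × Int) => pvBodyA s st p.1 p.2)
      = (fun (st : Int × List String) p =>
          if pvCA s p && !(st.2.contains (pvVA s p)) then (st.1 + 1, st.2 ++ [pvVA s p])
          else st) := rfl
  have h0 : ((0 : Int), ([] : List String))
      = (((([] : List String)).length : Int), ([] : List String)) := by simp
  rw [show ((PySem.List.pyRange 2 (PySem.Str.len s) 2).flatMap
        (fun i => (PySem.List.pyRange 0 (PySem.Str.len s - i + 1) 1).map (fun j => (i, j))))
      = pvPairsA s from rfl] at *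
  rw [h2, h0, pv_foldA]
  rfl

theorem pv_A_mem (s : String) (x : String) :
    x ∈ PySem.Set.ofList (((pvPairsA s).filter (pvCA s)).map (pvVA s)) ↔ pvFound s.toList x := by
  rw [PySem.Set.mem_ofList, List.mem_map]
  constructor
  · rintro ⟨p, hp, rfl⟩
    rw [List.mem_filter] at hp
    obtain ⟨hpl, hC⟩ := hp
    unfold pvPairsA at hpl
    simp only [List.mem_flatMap, List.mem_map] at hpl
    obtain ⟨i, hi, j, hj, rfl⟩ := hpl
    rw [PySem.List.mem_pyRange_iff_of_pos (by norm_num)] at hi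
    rw [PySem.List.mem_pyRange_one] at hj
    obtain ⟨hi2, hiL, d, hd⟩ := hi
    obtain ⟨hj0, hjU⟩ := hj
    rw [pv_len_eq s] at hiL hjU
    obtain ⟨h, hh1, rfl⟩ : ∃ h : Nat, 1 ≤ h ∧ i = ((2 * h : Nat) : Int) :=
      ⟨(d + 1).toNat, by omega, by push_cast; omega⟩
    obtain ⟨jn, rfl⟩ : ∃ jn : Nat, j = ((jn : Nat) : Int) := ⟨j.toNat, by omega⟩
    have hbn : 2 * h + 1 ≤ s.toList.length := by push_cast at hiL; omega
    have hjb : jn + 2 * h ≤ s.toList.length := by push_cast at hjU; omega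
    exact ⟨h, jn, hh1, hbn, hjb, (pv_CA_iff s h jn).mp hC, pv_part1_toList s h jn⟩
  · rintro ⟨h, jn, hh1, hbn, hjb, hseg, hx⟩
    refine ⟨(((2 * h : Nat) : Int), ((jn : Nat) : Int)), ?_, ?_⟩
    · rw [List.mem_filter]
      refine ⟨?_, (pv_CA_iff s h jn).mpr hseg⟩
      unfold pvPairsA
      simp only [List.mem_flatMap, List.mem_map]
      refine ⟨((2 * h : Nat) : Int), ?_, ((jn : Nat) : Int), ?_, rfl⟩
      · rw [PySem.List.mem_pyRange_iff_of_pos (by norm_num), pv_len_eq s]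
        refine ⟨by push_cast; omega, by push_cast; omega, ⟨((h : Int) - 1), by push_cast; omega⟩⟩
      · rw [PySem.List.mem_pyRange_one, pv_len_eq s]
        exact ⟨by push_cast; omega, by push_cast; omega⟩
    · rw [← String.toList_inj, pv_part1_toList s h jn]
      exact hx.symm

theorem pv_charA (s : String) :
    ∃ parts : List String, concatenation s = (parts.length : Int) ∧ parts.Nodup ∧
      ∀ x, x ∈ parts ↔ pvFound s.toList x :=
  ⟨PySem.Set.ofList (((pvPairsA s).filter (pvCA s)).map (pvVA s)), pv_A_eq s,
    PySem.Set.nodup_ofList _, fun x => pv_A_mem s x⟩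

-- ---- B-side characterisation ----

def pvStepB (s : String) (h : Int) (st : Int × PySem.Set String) (j : Int) :
    Int × PySem.Set String :=
  let run : Int := if PySem.Str.pyGet? s j == PySem.Str.pyGet? s (j + h) then st.1 + 1 else 0
  (run, if h ≤ run then PySem.Set.add st.2 (PySem.Str.slice s (some j) (some (j + h))) else st.2)

def pvInnerB (s : String) (h : Int) (init : Int × PySem.Set String) (a : Int) :
    Int × PySem.Set String :=
  (PySem.List.pyRange a (-1) (-1)).foldl (pvStepB s h) init

theorem pv_innerB (s : String) (h : Nat) :
    ∀ a : Nat, a + h ≤ s.toList.length →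
      ∀ S : PySem.Set String, S.Nodup →
        (pvInnerB s (h : Int) ((pvRun s.toList h a : Int), S) ((a : Int) - 1)).2.Nodup ∧
          ∀ y, y ∈ (pvInnerB s (h : Int) ((pvRun s.toList h a : Int), S) ((a : Int) - 1)).2 ↔
            y ∈ S ∨ ∃ j, j < a ∧ h ≤ pvRun s.toList h j ∧ y.toList = pvSeg s.toList j h := by
  intro a
  induction a with
  | zero =>
    intro _ S hS
    have e : ((0 : Nat) : Int) - 1 = (-1 : Int) := by norm_num
    have hnil : PySem.List.pyRange (-1) (-1) (-1) = [] :=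
      PySem.List.pyRange_neg_one_eq_nil (by norm_num)
    unfold pvInnerB
    rw [e, hnil, List.foldl_nil]
    exact ⟨hS, fun y => by simp⟩
  | succ a ih =>
    intro hle S hS
    have hget1 : PySem.Str.pyGet? s ((a : Nat) : Int) = s.toList[a]? := by
      simp
    have hget2 : PySem.Str.pyGet? s (((a : Nat) : Int) + ((h : Nat) : Int)) = s.toList[a + h]? := by
      have e : ((a : Nat) : Int) + ((h : Nat) : Int) = ((a + h : Nat) : Int) := by push_cast; ring
      rw [e, PySem.Str.pyGet?_natCast]
    have hrunEq : pvRun s.toList h a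
        = if s.toList[a]? == s.toList[a + h]? then pvRun s.toList h (a + 1) + 1 else 0 := by
      rw [pvRun, dif_pos (by omega)]
    have hrun : (if PySem.Str.pyGet? s ((a : Nat) : Int)
          == PySem.Str.pyGet? s (((a : Nat) : Int) + ((h : Nat) : Int))
        then ((pvRun s.toList h (a + 1) : Nat) : Int) + 1 else 0)
        = ((pvRun s.toList h a : Nat) : Int) := by
      rw [hget1, hget2, hrunEq]
      by_cases hb : (s.toList[a]? == s.toList[a + h]?) = true
      · rw [if_pos hb, if_pos hb]; push_cast; ring
      · rw [if_neg hb, if_neg hb]; simp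
    have hstep : pvStepB s (h : Int) ((pvRun s.toList h (a + 1) : Int), S) ((a : Nat) : Int)
        = ((pvRun s.toList h a : Int),
            if h ≤ pvRun s.toList h a then
              PySem.Set.add S (PySem.Str.slice s (some ((a : Nat) : Int))
                (some (((a : Nat) : Int) + ((h : Nat) : Int))))
            else S) := by
      unfold pvStepB
      simp only [hrun, Nat.cast_le]
    have hcons : PySem.List.pyRange (((a + 1 : Nat) : Int) - 1) (-1) (-1)
        = ((a : Nat) : Int) :: PySem.List.pyRange (((a : Nat) : Int) - 1) (-1) (-1) := by
      have e : ((a + 1 : Nat) : Int) - 1 = ((a : Nat) : Int) := by push_cast; ring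
      rw [e, PySem.List.pyRange_neg_one_cons (by omega)]
    have hsplit : pvInnerB s (h : Int) ((pvRun s.toList h (a + 1) : Int), S) (((a + 1 : Nat) : Int) - 1)
        = pvInnerB s (h : Int)
            ((pvRun s.toList h a : Int),
              if h ≤ pvRun s.toList h a then
                PySem.Set.add S (PySem.Str.slice s (some ((a : Nat) : Int))
                  (some (((a : Nat) : Int) + ((h : Nat) : Int))))
              else S) (((a : Nat) : Int) - 1) := by
      unfold pvInnerB
      rw [hcons, List.foldl_cons, hstep]
    rw [hsplit]
    by_cases hcond : h ≤ pvRun s.toList h a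
    · rw [if_pos hcond]
      have hS' : (PySem.Set.add S (PySem.Str.slice s (some ((a : Nat) : Int))
          (some (((a : Nat) : Int) + ((h : Nat) : Int))))).Nodup := PySem.Set.nodup_add _ _ hS
      obtain ⟨hnd, hmem⟩ := ih (by omega) _ hS'
      refine ⟨hnd, fun y => ?_⟩
      rw [hmem y, PySem.Set.mem_add]
      have hyiff : y = PySem.Str.slice s (some ((a : Nat) : Int))
            (some (((a : Nat) : Int) + ((h : Nat) : Int)))
          ↔ y.toList = pvSeg s.toList a h := by
        rw [← String.toList_inj, pv_slice_toList]
        rfl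
      constructor
      · rintro ((hy | hy) | ⟨j, hj, hrj, hyt⟩)
        · exact Or.inl hy
        · exact Or.inr ⟨a, by omega, hcond, hyiff.mp hy⟩
        · exact Or.inr ⟨j, by omega, hrj, hyt⟩
      · rintro (hy | ⟨j, hj, hrj, hyt⟩)
        · exact Or.inl (Or.inl hy)
        · by_cases hja : j = a
          · subst hja
            exact Or.inl (Or.inr (hyiff.mpr hyt))
          · exact Or.inr ⟨j, by omega, hrj, hyt⟩
    · rw [if_neg hcond]
      obtain ⟨hnd, hmem⟩ := ih (by omega) S hS
      refine ⟨hnd, fun y => ?_⟩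
      rw [hmem y]
      constructor
      · rintro (hy | ⟨j, hj, hrj, hyt⟩)
        · exact Or.inl hy
        · exact Or.inr ⟨j, by omega, hrj, hyt⟩
      · rintro (hy | ⟨j, hj, hrj, hyt⟩)
        · exact Or.inl hy
        · by_cases hja : j = a
          · subst hja
            exact absurd hrj hcond
          · exact Or.inr ⟨j, by omega, hrj, hyt⟩

theorem pv_setlen (S : PySem.Set String) : PySem.Set.len S = (S.length : Int) := rfl

theorem pv_charB (s : String) :
    ∃ halves : List String, concatenation_alt s = (halves.length : Int) ∧ halves.Nodup ∧
      ∀ x, x ∈ halves ↔ pvFound s.toList x := by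
  have hB : concatenation_alt s
      = PySem.Set.len ((PySem.List.pyRange 1
          (PySem.Int.floordiv (PySem.Str.len s - 1) 2 + 1) 1).foldl
          (fun halves h => (pvInnerB s h ((0 : Int), halves) (PySem.Str.len s - h - 1)).2)
          PySem.Set.empty) := rfl
  have hF : ∀ (S : PySem.Set String) (a : Int),
      a ∈ PySem.List.pyRange 1 (PySem.Int.floordiv (PySem.Str.len s - 1) 2 + 1) 1 →
      S.Nodup →
        ((pvInnerB s a ((0 : Int), S) (PySem.Str.len s - a - 1)).2.Nodup ∧
          ∀ y, y ∈ (pvInnerB s a ((0 : Int), S) (PySem.Str.len s - a - 1)).2 ↔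
            y ∈ S ∨ ∃ hn j : Nat, a = ((hn : Nat) : Int) ∧ 1 ≤ hn ∧
              2 * hn + 1 ≤ s.toList.length ∧ j + 2 * hn ≤ s.toList.length ∧
              pvSeg s.toList j hn = pvSeg s.toList (j + hn) hn ∧
              y.toList = pvSeg s.toList j hn) := by
    intro S a ha hS
    rw [PySem.List.mem_pyRange_one] at ha
    obtain ⟨ha1, ha2⟩ := ha
    have hmul : a * 2 ≤ PySem.Str.len s - 1 :=
      (PySem.Int.le_floordiv_iff_mul_le (by norm_num)).mp (by omega)
    rw [pv_len_eq s] at hmul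
    obtain ⟨hn, rfl⟩ : ∃ hn : Nat, a = ((hn : Nat) : Int) := ⟨a.toNat, by omega⟩
    have h1n : 1 ≤ hn := by omega
    have hbound : 2 * hn + 1 ≤ s.toList.length := by omega
    have e2 : pvRun s.toList hn (s.toList.length - hn) = 0 := by
      rw [pvRun, dif_neg (by omega)]
    have e2' : (0 : Int) = ((pvRun s.toList hn (s.toList.length - hn) : Nat) : Int) := by
      rw [e2]; simp
    have e1 : PySem.Str.len s - ((hn : Nat) : Int) - 1
        = (((s.toList.length - hn : Nat)) : Int) - 1 := by
      rw [pv_len_eq s]; omega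
    obtain ⟨hnd, hmem⟩ := pv_innerB s hn (s.toList.length - hn) (by omega) S hS
    rw [e1, e2']
    refine ⟨hnd, fun y => ?_⟩
    rw [hmem y]
    constructor
    · rintro (hy | ⟨j, hj, hrj, hyt⟩)
      · exact Or.inl hy
      · obtain ⟨hjb, hseg⟩ := (pvRun_ge_iff s.toList hn j h1n).mp hrj
        exact Or.inr ⟨hn, j, rfl, h1n, hbound, hjb, hseg, hyt⟩
    · rintro (hy | ⟨hn', j, hEq, h1n', hbnd', hjb', hseg', hyt'⟩)
      · exact Or.inl hy
      · have : hn' = hn := by omega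
        subst this
        refine Or.inr ⟨j, by omega, ?_, hyt'⟩
        exact (pvRun_ge_iff s.toList hn' j h1n').mpr ⟨hjb', hseg'⟩
  obtain ⟨hnd, hmem⟩ := pv_setfold _ _ _ hF PySem.Set.empty List.nodup_nil
  refine ⟨_, by rw [hB, pv_setlen], hnd, fun x => ?_⟩
  rw [hmem x]
  constructor
  · rintro (hx | ⟨a, ha, hn, j, hEq, h1n, hbnd, hjb, hseg, hxt⟩)
    · exact absurd hx (List.not_mem_nil)
    · exact ⟨hn, j, h1n, hbnd, hjb, hseg, hxt⟩
  · rintro ⟨h, j, h1, hbn, hjb, hseg, hxt⟩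
    refine Or.inr ⟨((h : Nat) : Int), ?_, h, j, rfl, h1, hbn, hjb, hseg, hxt⟩
    rw [PySem.List.mem_pyRange_one]
    constructor
    · omega
    · have : ((h : Nat) : Int) ≤ PySem.Int.floordiv (PySem.Str.len s - 1) 2 := by
        rw [PySem.Int.le_floordiv_iff_mul_le (by norm_num), pv_len_eq s]
        omega
      omega

-- ===== VERDICT (by name: the statement is the Claim_ definition above) =====
theorem concatenation_spec : Claim_equal_concatenation := by
  intro s _
  unfold Spec_concatenation
  obtain ⟨pa, ha1, ha2, ha3⟩ := pv_charA s
  obtain ⟨pb, hb1, hb2, hb3⟩ := pv_charB s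
  rw [ha1, hb1]
  have hperm : pa.Perm pb :=
    (List.perm_ext_iff_of_nodup ha2 hb2).mpr (fun x => (ha3 x).trans (hb3 x).symm)
  exact_mod_cast congrArg Nat.cast hperm.length_eq
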